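-- pv_equiv track=rewrite | github.com/panisson/gern | src/utils.py | predict_fast
-- ===== SOURCE A (Python) =====
-- def predict_fast(rpg, Q, labels, max_dist=None):
--     Qs = set(list(Q))
--     prediction = dict()
--     pred_prev = None
--     idx_prev = 0
--     for i, node in enumerate(rpg):
--         if node in Qs:
--             prediction[node] = (labels[node],0)
--
--             if pred_prev is None:
--                 pred_prev = labels[node]
--                 idx_prev = i
--                 for j in range(i):
--                     prediction[rpg[j]] = (pred_prev, i-j)
--
--             else:
--
--                 s, m = idx_prev+1, idx_prev + (i-idx_prev-1)//2 + 1 # preference to last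
--                 # s, m = idx_prev+1, idx_prev + (i-idx_prev)//2 + 1
--                 for j in range(s, m):
--                     prediction[rpg[j]] = (pred_prev, j-idx_prev)
--
--                 #prediction[rpg[m]].append((pred_prev, j+2-idx_prev))
--                 pred_prev = labels[node]
--                 for j in range(m, i):
--                     prediction[rpg[j]] = (pred_prev, i-j)
--
--             idx_prev = i
--
--     if node not in Qs:
--         for j in range(idx_prev+1, i+1):
--             prediction[rpg[j]] = (pred_prev, j-idx_prev)
--
--     if max_dist is None:
--         return [prediction[i][0] for i in range(len(labels))]
--     else:
--         return [prediction[i][0] if prediction[i][1] <= max_dist else None for i in range(len(labels))]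
-- ===== SOURCE B (Python) =====
-- def predict_fast(rpg, Q, labels, max_dist=None):
--     n = len(rpg)
--     Qs = set(Q)
--     # forward pass: nearest query at or before each position
--     fwd = []
--     last = None
--     for i in range(n):
--         if rpg[i] in Qs:
--             last = (labels[rpg[i]], i)
--         fwd.append(None if last is None else (last[0], i - last[1]))
--     # backward pass: nearest query at or after each position
--     bwd = []
--     nxt = None
--     for i in reversed(range(n)):
--         if rpg[i] in Qs:
--             nxt = (labels[rpg[i]], i)
--         bwd.append(None if nxt is None else (nxt[0], nxt[1] - i))
--     bwd.reverse()
--     # combine: strictly closer preceding query wins, ties go to the following one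
--     val = {}
--     for i in range(n):
--         if fwd[i] is None:
--             val[rpg[i]] = bwd[i]
--         elif bwd[i] is None:
--             val[rpg[i]] = fwd[i]
--         else:
--             val[rpg[i]] = fwd[i] if fwd[i][1] < bwd[i][1] else bwd[i]
--     if max_dist is None:
--         return [val[i][0] for i in range(len(labels))]
--     return [val[i][0] if val[i][1] <= max_dist else None for i in range(len(labels))]
-- ===== Notes on version B (the rewrite author's own statement) =====
-- stated objective: alternative
-- what changed: A walks the path once, filling a dict segment-by-segment between consecutive query hits via an explicit floor-midpoint split plus special first-segment and trailing fills; B instead does two independent linear sweeps (forward and backward) recording the nearest preceding/following query label and distance per position and combines them per position with a strict-min rule breaking ties toward the following query.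
-- outside the precondition, e.g. on predict_fast([0, 0], [], [5], None): A returns [None], B raises TypeError
import Mathlib
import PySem

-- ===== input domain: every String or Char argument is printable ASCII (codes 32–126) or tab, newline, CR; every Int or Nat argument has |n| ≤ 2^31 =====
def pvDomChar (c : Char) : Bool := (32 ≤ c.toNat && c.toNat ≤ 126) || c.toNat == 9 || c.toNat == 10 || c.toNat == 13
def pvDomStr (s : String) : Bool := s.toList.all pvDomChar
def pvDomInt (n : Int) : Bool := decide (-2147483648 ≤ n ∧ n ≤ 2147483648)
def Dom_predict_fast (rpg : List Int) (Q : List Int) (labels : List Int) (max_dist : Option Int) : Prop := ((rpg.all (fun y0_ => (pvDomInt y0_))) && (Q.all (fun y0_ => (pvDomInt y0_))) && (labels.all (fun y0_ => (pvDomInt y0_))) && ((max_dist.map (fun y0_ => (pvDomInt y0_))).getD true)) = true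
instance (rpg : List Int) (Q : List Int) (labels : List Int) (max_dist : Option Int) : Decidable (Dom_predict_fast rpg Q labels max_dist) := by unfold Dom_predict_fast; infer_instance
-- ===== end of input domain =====

-- B replaces A's segment-by-segment dict filling (floor-midpoint split between consecutive
-- query hits) by two linear nearest-query sweeps combined per position; same cost, different
-- decomposition ("alternative").


-- ===== PORT A =====
-- the body of A's main loop, one step per enumerate(rpg) pair (i, node)
def pvAstep (Qs : PySem.Set Int) (rpg : List Int) (labels : List Int)
    (st : PySem.Dict Int (Int × Int) × Option Int × Int) (p : Int × Int) :
    PySem.Dict Int (Int × Int) × Option Int × Int :=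
  let prediction := st.1
  let pred_prev := st.2.1
  let idx_prev := st.2.2
  let i := p.1
  let node := p.2
  if PySem.Set.contains Qs node then
    let lab := (PySem.List.pyGet? labels node).getD 0   -- labels[node]; in range under Pre_
    let prediction := prediction.insert node (lab, 0)
    match pred_prev with
    | none =>
        (((PySem.List.pyRange 0 i 1).foldl (fun d j =>
            d.insert ((PySem.List.pyGet? rpg j).getD 0) (lab, i - j)) prediction), some lab, i)
    | some pp =>
        let s := idx_prev + 1
        let m := idx_prev + PySem.Int.floordiv (i - idx_prev - 1) 2 + 1   -- preference to last
        let prediction := (PySem.List.pyRange s m 1).foldl (fun d j =>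
            d.insert ((PySem.List.pyGet? rpg j).getD 0) (pp, j - idx_prev)) prediction
        let prediction := (PySem.List.pyRange m i 1).foldl (fun d j =>
            d.insert ((PySem.List.pyGet? rpg j).getD 0) (lab, i - j)) prediction
        (prediction, some lab, i)
  else (prediction, pred_prev, idx_prev)

def predict_fast (rpg : List Int) (Q : List Int) (labels : List Int) (max_dist : Option Int) : List (Option Int) :=
  let Qs : PySem.Set Int := PySem.Set.ofList Q
  let st := (PySem.List.enumerate rpg 0).foldl (pvAstep Qs rpg labels) (PySem.Dict.empty, none, 0)
  match rpg.getLast? with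
  | none => []   -- empty rpg: the Python raises NameError ('node' unbound); excluded by Pre_
  | some node =>
    let i : Int := PySem.List.len rpg - 1
    let prediction :=
      if PySem.Set.contains Qs node then st.1
      else (PySem.List.pyRange (st.2.2 + 1) (i + 1) 1).foldl (fun d j =>
          d.insert ((PySem.List.pyGet? rpg j).getD 0) ((st.2.1).getD 0, j - st.2.2)) st.1
          -- pred_prev is None here only when rpg carries no query; excluded by Pre_
    match max_dist with
    | none => (PySem.List.pyRange 0 (PySem.List.len labels) 1).map
        (fun k => some ((prediction.get? k).getD (0, 0)).1)   -- prediction[k]; key present under Pre_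
    | some md => (PySem.List.pyRange 0 (PySem.List.len labels) 1).map
        (fun k => if ((prediction.get? k).getD (0, 0)).2 ≤ md
                  then some ((prediction.get? k).getD (0, 0)).1 else none)

-- ===== PORT B =====
-- forward-sweep step: remember the latest query hit, record (its label, distance back to it)
def pvBfwdStep (Qs : PySem.Set Int) (rpg : List Int) (labels : List Int)
    (st : Option (Int × Int) × List (Option (Int × Int))) (i : Int) :
    Option (Int × Int) × List (Option (Int × Int)) :=
  let node := (PySem.List.pyGet? rpg i).getD 0
  let last := if PySem.Set.contains Qs node
              then some ((PySem.List.pyGet? labels node).getD 0, i) else st.1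
  (last, st.2 ++ [last.map (fun l => (l.1, i - l.2))])

-- backward-sweep step (run over reversed(range(n)))
def pvBbwdStep (Qs : PySem.Set Int) (rpg : List Int) (labels : List Int)
    (st : Option (Int × Int) × List (Option (Int × Int))) (i : Int) :
    Option (Int × Int) × List (Option (Int × Int)) :=
  let node := (PySem.List.pyGet? rpg i).getD 0
  let nxt := if PySem.Set.contains Qs node
             then some ((PySem.List.pyGet? labels node).getD 0, i) else st.1
  (nxt, st.2 ++ [nxt.map (fun l => (l.1, l.2 - i))])

-- combine step: strictly closer preceding query wins, ties go to the following one
def pvBvalStep (rpg : List Int) (fwd bwd : List (Option (Int × Int)))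
    (d : PySem.Dict Int (Int × Int)) (i : Int) : PySem.Dict Int (Int × Int) :=
  let node := (PySem.List.pyGet? rpg i).getD 0
  match (PySem.List.pyGet? fwd i).getD none, (PySem.List.pyGet? bwd i).getD none with
  | none, b => d.insert node (b.getD (0, 0))   -- b is none only when rpg carries no query; excluded by Pre_
  | some fv, none => d.insert node fv
  | some fv, some bv => d.insert node (if fv.2 < bv.2 then fv else bv)

def predict_fast_alt (rpg : List Int) (Q : List Int) (labels : List Int) (max_dist : Option Int) : List (Option Int) :=
  let n := PySem.List.len rpg
  let Qs : PySem.Set Int := PySem.Set.ofList Q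
  let fwd := ((PySem.List.pyRange 0 n 1).foldl (pvBfwdStep Qs rpg labels) (none, [])).2
  let bwd := (((PySem.List.pyRange 0 n 1).reverse.foldl (pvBbwdStep Qs rpg labels) (none, [])).2).reverse
  let val := (PySem.List.pyRange 0 n 1).foldl (pvBvalStep rpg fwd bwd) PySem.Dict.empty
  match max_dist with
  | none => (PySem.List.pyRange 0 (PySem.List.len labels) 1).map
      (fun k => some ((val.get? k).getD (0, 0)).1)   -- val[k]; key present under Pre_
  | some md => (PySem.List.pyRange 0 (PySem.List.len labels) 1).map
      (fun k => if ((val.get? k).getD (0, 0)).2 ≤ md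
                then some ((val.get? k).getD (0, 0)).1 else none)

-- ===== PRECONDITION & SPEC =====
-- Pre_ is the function's natural domain: rpg meets Q, every label index occurs as a value in
-- rpg, and every query value on the path is a valid Python index into labels. Outside it the
-- Python A raises (NameError on empty rpg, KeyError when rpg misses a label index, IndexError
-- on an out-of-range query node), or — when no query lies on the path — returns all-None
-- predictions, an artefact of its un-initialised pred_prev that B's sweeps have no value for.
def Pre_predict_fast (rpg : List Int) (Q : List Int) (labels : List Int) (max_dist : Option Int) : Prop :=
  ((∃ x ∈ rpg, x ∈ Q) ∨ (labels = [] ∧ rpg ≠ [])) ∧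
  (∀ i ∈ List.range labels.length, (i : Int) ∈ rpg) ∧
  (∀ x ∈ rpg, x ∈ Q → PySem.Raise.InRange labels.length x)
instance (rpg : List Int) (Q : List Int) (labels : List Int) (max_dist : Option Int) : Decidable (Pre_predict_fast rpg Q labels max_dist) := by unfold Pre_predict_fast; infer_instance

def pvWitness_predict_fast : List Int × List Int × List Int × Option Int := ([1, 0, 2], [2, 5], [4, 7, 9], some 1)

def Spec_predict_fast (rpg : List Int) (Q : List Int) (labels : List Int) (max_dist : Option Int) (out : List (Option Int)) : Prop := out = predict_fast_alt rpg Q labels max_dist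
instance (rpg : List Int) (Q : List Int) (labels : List Int) (max_dist : Option Int) (out : List (Option Int)) : Decidable (Spec_predict_fast rpg Q labels max_dist out) := by unfold Spec_predict_fast; infer_instance

-- ===== CLAIM (what is proved, stated in full; the proofs are below) =====
def Claim_equal_predict_fast : Prop := ∀ (rpg : List Int) (Q : List Int) (labels : List Int) (max_dist : Option Int), Dom_predict_fast rpg Q labels max_dist → Pre_predict_fast rpg Q labels max_dist → Spec_predict_fast rpg Q labels max_dist (predict_fast rpg Q labels max_dist)

-- ===== LEMMAS AND PROOFS =====

-- abstract description of both programs: query flag, label, nearest query before / at-or-after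
def pvQb (rpg Q : List Int) (j : Nat) : Bool :=
  PySem.Set.contains (PySem.Set.ofList Q) (rpg.getD j 0)
def pvLab (rpg labels : List Int) (p : Nat) : Int :=
  (PySem.List.pyGet? labels (rpg.getD p 0)).getD 0
def pvPrev (rpg Q : List Int) : Nat → Option Nat
  | 0 => none
  | t + 1 => if pvQb rpg Q t then some t else pvPrev rpg Q t
def pvNext (rpg Q : List Int) (n t : Nat) : Option Nat :=
  (List.range' t (n - t)).find? (pvQb rpg Q)
-- the value both programs associate with path position j
def pvSpec (rpg Q labels : List Int) (n j : Nat) : Int × Int :=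
  match pvPrev rpg Q (j + 1), pvNext rpg Q n j with
  | none, none => (0, 0)
  | none, some q => (pvLab rpg labels q, (q : Int) - (j : Int))
  | some p, none => (pvLab rpg labels p, (j : Int) - (p : Int))
  | some p, some q =>
      if (j : Int) - (p : Int) < (q : Int) - (j : Int)
      then (pvLab rpg labels p, (j : Int) - (p : Int))
      else (pvLab rpg labels q, (q : Int) - (j : Int))

-- ---- generic facts about insert-folds over an index list ----
theorem pv_fold_get?_ne (l : List Int) (key : Int → Int) (v : Int → Int × Int)
    (d : PySem.Dict Int (Int × Int)) (x : Int) (h : ∀ j ∈ l, key j ≠ x) :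
    (l.foldl (fun d j => d.insert (key j) (v j)) d).get? x = d.get? x := by
  induction l generalizing d with
  | nil => rfl
  | cons a l ih =>
    simp only [List.foldl_cons]
    rw [ih _ (fun j hj => h j (List.mem_cons_of_mem _ hj)),
      PySem.Dict.get?_insert_of_ne _ _ (Ne.symm (h a List.mem_cons_self))]

theorem pv_fold_get?_last (l : List Int) (key : Int → Int) (v : Int → Int × Int)
    (j0 : Int) : ∀ (d : PySem.Dict Int (Int × Int)), l.Pairwise (· < ·) → j0 ∈ l →
    (∀ j ∈ l, key j = key j0 → j ≤ j0) →
    (l.foldl (fun d j => d.insert (key j) (v j)) d).get? (key j0) = some (v j0) := by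
  induction l with
  | nil => intro d _ hj _; cases hj
  | cons a l ih =>
    intro d hpw hj hmax
    simp only [List.foldl_cons]
    rcases List.mem_cons.1 hj with rfl | hj'
    · have hne : ∀ j ∈ l, key j ≠ key j0 := by
        intro j hjl hkey
        have h1 := hmax j (List.mem_cons_of_mem _ hjl) hkey
        have h2 := (List.pairwise_cons.1 hpw).1 j hjl
        omega
      rw [pv_fold_get?_ne _ _ _ _ _ hne, PySem.Dict.get?_insert_self]
    · exact ih _ (List.pairwise_cons.1 hpw).2 hj'
        (fun j hjl h => hmax j (List.mem_cons_of_mem _ hjl) h)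

-- ---- pvPrev / pvNext bookkeeping ----
theorem pvPrev_succ (rpg Q : List Int) (t : Nat) :
    pvPrev rpg Q (t + 1) = if pvQb rpg Q t then some t else pvPrev rpg Q t := rfl

theorem pvPrev_none_all {rpg Q : List Int} {t : Nat} (h : pvPrev rpg Q t = none) :
    ∀ j < t, pvQb rpg Q j = false := by
  induction t with
  | zero => omega
  | succ t ih =>
    intro j hj
    rw [pvPrev_succ] at h
    by_cases hq : pvQb rpg Q t
    · simp [hq] at h
    · rw [if_neg hq] at h
      rcases Nat.lt_succ_iff_lt_or_eq.1 hj with h' | rfl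
      · exact ih h j h'
      · simpa using hq

theorem pvPrev_none_mono {rpg Q : List Int} {t s : Nat} (h : pvPrev rpg Q t = none)
    (hst : s ≤ t) : pvPrev rpg Q s = none := by
  induction s with
  | zero => rfl
  | succ s ih =>
    rw [pvPrev_succ, pvPrev_none_all h s (by omega)]
    simpa using ih (by omega)

theorem pvPrev_lt {rpg Q : List Int} {t p : Nat} (h : pvPrev rpg Q t = some p) :
    p < t ∧ pvQb rpg Q p = true := by
  induction t with
  | zero => simp [pvPrev] at h
  | succ t ih =>
    rw [pvPrev_succ] at h
    by_cases hq : pvQb rpg Q t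
    · rw [if_pos hq] at h
      rw [Option.some.injEq] at h
      exact ⟨by omega, h ▸ hq⟩
    · rw [if_neg hq] at h
      obtain ⟨h1, h2⟩ := ih h
      exact ⟨by omega, h2⟩

theorem pvPrev_gap {rpg Q : List Int} {t p : Nat} (h : pvPrev rpg Q t = some p) :
    ∀ j, p < j → j < t → pvQb rpg Q j = false := by
  induction t with
  | zero => intro j _ hj; omega
  | succ t ih =>
    intro j hpj hjt
    rw [pvPrev_succ] at h
    by_cases hq : pvQb rpg Q t
    · rw [if_pos hq] at h
      rw [Option.some.injEq] at h
      omega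
    · rw [if_neg hq] at h
      rcases Nat.lt_succ_iff_lt_or_eq.1 hjt with h' | rfl
      · exact ih h j hpj h'
      · simpa using hq

theorem pvPrev_stable {rpg Q : List Int} {t p : Nat} (h : pvPrev rpg Q t = some p) :
    ∀ s, p < s → s ≤ t → pvPrev rpg Q s = some p := by
  induction t with
  | zero => simp [pvPrev] at h
  | succ t ih =>
    intro s hps hst
    rw [pvPrev_succ] at h
    by_cases hq : pvQb rpg Q t
    · rw [if_pos hq] at h
      rw [Option.some.injEq] at h
      have hs : s = t + 1 := by omega
      subst hs
      rw [pvPrev_succ, if_pos hq]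
      simp [h]
    · rw [if_neg hq] at h
      rcases Nat.lt_succ_iff_lt_or_eq.1 (Nat.lt_succ_of_le hst) with h' | rfl
      · exact ih h s hps (by omega)
      · rw [pvPrev_succ, if_neg hq]
        exact h

theorem pvNext_self {rpg Q : List Int} {n t : Nat} (h : t < n) (hq : pvQb rpg Q t = true) :
    pvNext rpg Q n t = some t := by
  unfold pvNext
  have hs : n - t = (n - t - 1) + 1 := by omega
  rw [hs, List.range'_succ, List.find?_cons_of_pos (by simp [hq])]

theorem pvNext_succ {rpg Q : List Int} {n t : Nat} (h : t < n) (hq : pvQb rpg Q t = false) :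
    pvNext rpg Q n t = pvNext rpg Q n (t + 1) := by
  unfold pvNext
  have hs : n - t = (n - (t + 1)) + 1 := by omega
  rw [hs, List.range'_succ, List.find?_cons_of_neg (by simp [hq])]

theorem pvNext_none {rpg Q : List Int} {n t : Nat}
    (h : ∀ j, t ≤ j → j < n → pvQb rpg Q j = false) : pvNext rpg Q n t = none := by
  unfold pvNext
  rw [List.find?_eq_none]
  intro x hx
  have := List.mem_range'_1.1 hx
  simp [h x (by omega) (by omega)]

theorem pvNext_of_gap {rpg Q : List Int} {n t : Nat} (htn : t < n)
    (hq : pvQb rpg Q t = true) :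
    ∀ d j, t = j + d → (∀ k, j ≤ k → k < t → pvQb rpg Q k = false) →
    pvNext rpg Q n j = some t := by
  intro d
  induction d with
  | zero =>
    intro j hj _
    have : j = t := by omega
    subst this
    exact pvNext_self htn hq
  | succ d ih =>
    intro j hj gap
    rw [pvNext_succ (by omega) (gap j (by omega) (by omega))]
    exact ih (j + 1) (by omega) (fun k hk1 hk2 => gap k (by omega) hk2)

-- index expression used as dict key by both ports
theorem pv_key_int (rpg : List Int) {j : Int} (h : 0 ≤ j) :
    (PySem.List.pyGet? rpg j).getD 0 = rpg.getD j.toNat 0 := by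
  rw [PySem.List.pyGet?_of_nonneg rpg h]
  exact List.getD_eq_getElem?_getD.symm

theorem pv_key_nat (rpg : List Int) (j : Nat) :
    (PySem.List.pyGet? rpg (j : Int)).getD 0 = rpg.getD j 0 := by
  rw [pv_key_int rpg (Int.natCast_nonneg j), Int.toNat_natCast]

-- last occurrence of value x among the first b path positions
def pvOcc (rpg : List Int) (x : Int) : Nat → Option Nat
  | 0 => none
  | b + 1 => if rpg.getD b 0 = x then some b else pvOcc rpg x b

theorem pvOcc_succ (rpg : List Int) (x : Int) (b : Nat) :
    pvOcc rpg x (b + 1) = if rpg.getD b 0 = x then some b else pvOcc rpg x b := rfl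

theorem pvOcc_none_all {rpg : List Int} {x : Int} {b : Nat} (h : pvOcc rpg x b = none) :
    ∀ j < b, rpg.getD j 0 ≠ x := by
  induction b with
  | zero => omega
  | succ b ih =>
    intro j hj
    rw [pvOcc_succ] at h
    by_cases hb : rpg.getD b 0 = x
    · rw [if_pos hb] at h
      cases h
    · rw [if_neg hb] at h
      rcases Nat.lt_succ_iff_lt_or_eq.1 hj with h' | rfl
      · exact ih h j h'
      · exact hb

theorem pvOcc_none_mono {rpg : List Int} {x : Int} {b s : Nat} (h : pvOcc rpg x b = none)
    (hsb : s ≤ b) : pvOcc rpg x s = none := by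
  induction s with
  | zero => rfl
  | succ s ih =>
    rw [pvOcc_succ, if_neg (pvOcc_none_all h s (by omega))]
    exact ih (by omega)

theorem pvOcc_lt {rpg : List Int} {x : Int} {b jx : Nat} (h : pvOcc rpg x b = some jx) :
    jx < b ∧ rpg.getD jx 0 = x := by
  induction b with
  | zero => cases h
  | succ b ih =>
    rw [pvOcc_succ] at h
    by_cases hb : rpg.getD b 0 = x
    · rw [if_pos hb] at h
      have hbj := Option.some.inj h
      subst hbj
      exact ⟨by omega, hb⟩
    · rw [if_neg hb] at h
      obtain ⟨h1, h2⟩ := ih h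
      exact ⟨by omega, h2⟩

theorem pvOcc_gap {rpg : List Int} {x : Int} {b jx : Nat} (h : pvOcc rpg x b = some jx) :
    ∀ j, jx < j → j < b → rpg.getD j 0 ≠ x := by
  induction b with
  | zero => intro j _ hj; omega
  | succ b ih =>
    intro j hxj hjb
    rw [pvOcc_succ] at h
    by_cases hb : rpg.getD b 0 = x
    · rw [if_pos hb] at h
      have hbj := Option.some.inj h
      omega
    · rw [if_neg hb] at h
      rcases Nat.lt_succ_iff_lt_or_eq.1 hjb with h' | rfl
      · exact ih h j hxj h'
      · exact hb

theorem pvOcc_stable {rpg : List Int} {x : Int} {b jx : Nat} (h : pvOcc rpg x b = some jx) :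
    ∀ s, jx < s → s ≤ b → pvOcc rpg x s = some jx := by
  induction b with
  | zero => cases h
  | succ b ih =>
    intro s hxs hsb
    rw [pvOcc_succ] at h
    by_cases hb : rpg.getD b 0 = x
    · rw [if_pos hb] at h
      have hbj := Option.some.inj h
      have hs : s = b + 1 := by omega
      subst hs
      rw [pvOcc_succ, if_pos hb]
      exact h
    · rw [if_neg hb] at h
      rcases Nat.lt_succ_iff_lt_or_eq.1 (Nat.lt_succ_of_le hsb) with h' | rfl
      · exact ih h s hxs (by omega)
      · rw [pvOcc_succ, if_neg hb]
        exact h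

theorem pvOcc_of_mem {rpg : List Int} {x : Int} (h : x ∈ rpg) :
    ∃ jx, pvOcc rpg x rpg.length = some jx := by
  cases ho : pvOcc rpg x rpg.length with
  | some jx => exact ⟨jx, rfl⟩
  | none =>
    obtain ⟨j, hj, hjx⟩ := List.mem_iff_getElem.1 h

    exact absurd (by rw [List.getD_eq_getElem _ _ hj, hjx])
      (pvOcc_none_all ho j hj)

-- fills over pyRange, specialised forms of the generic fold lemmas
theorem pv_fill_get?_ne (rpg : List Int) (v : Int → Int × Int) (lo hi : Int)
    (d : PySem.Dict Int (Int × Int)) (x : Int)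
    (h : ∀ j : Int, lo ≤ j → j < hi → (PySem.List.pyGet? rpg j).getD 0 ≠ x) :
    ((PySem.List.pyRange lo hi 1).foldl
      (fun d j => d.insert ((PySem.List.pyGet? rpg j).getD 0) (v j)) d).get? x = d.get? x :=
  pv_fold_get?_ne _ _ v d x (fun j hj => by
    have hm := PySem.List.mem_pyRange_one.1 hj
    exact h j hm.1 hm.2)

theorem pv_fill_get?_last (rpg : List Int) (v : Int → Int × Int) (lo hi : Int)
    (d : PySem.Dict Int (Int × Int)) (j0 : Int) (h1 : lo ≤ j0) (h2 : j0 < hi)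
    (hmax : ∀ j : Int, lo ≤ j → j < hi →
      (PySem.List.pyGet? rpg j).getD 0 = (PySem.List.pyGet? rpg j0).getD 0 → j ≤ j0) :
    ((PySem.List.pyRange lo hi 1).foldl
      (fun d j => d.insert ((PySem.List.pyGet? rpg j).getD 0) (v j)) d).get?
      ((PySem.List.pyGet? rpg j0).getD 0) = some (v j0) :=
  pv_fold_get?_last _ _ v j0 d (PySem.List.pairwise_lt_pyRange_one lo hi)
    (PySem.List.mem_pyRange_one.2 ⟨h1, h2⟩)
    (fun j hj hk => by
      have hm := PySem.List.mem_pyRange_one.1 hj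
      exact hmax j hm.1 hm.2 hk)

-- A's loop state after t steps
def pvStA (rpg Q labels : List Int) (t : Nat) :
    PySem.Dict Int (Int × Int) × Option Int × Int :=
  ((PySem.List.enumerate rpg 0).take t).foldl
    (pvAstep (PySem.Set.ofList Q) rpg labels) (PySem.Dict.empty, none, 0)

theorem pvStA_succ (rpg Q labels : List Int) (t : Nat) (ht : t < rpg.length) :
    pvStA rpg Q labels (t + 1) =
    pvAstep (PySem.Set.ofList Q) rpg labels (pvStA rpg Q labels t) ((t : Int), rpg.getD t 0) := by
  unfold pvStA
  rw [List.take_add_one, PySem.List.getElem?_enumerate, List.getElem?_eq_getElem (by simpa using ht)]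
  simp [List.getD_eq_getElem?_getD, List.getElem?_eq_getElem (by simpa using ht)]

-- the invariant carried by A's loop
def pvInvA (rpg Q labels : List Int) (t : Nat)
    (st : PySem.Dict Int (Int × Int) × Option Int × Int) : Prop :=
  match pvPrev rpg Q t with
  | none => st = (PySem.Dict.empty, none, 0)
  | some p =>
      st.2.1 = some (pvLab rpg labels p) ∧ st.2.2 = (p : Int) ∧
      (∀ (x : Int) (jx : Nat), pvOcc rpg x (p + 1) = some jx →
        st.1.get? x = some (pvSpec rpg Q labels rpg.length jx)) ∧
      (∀ x : Int, pvOcc rpg x (p + 1) = none → st.1.get? x = none)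

theorem pvQb_congr {rpg Q : List Int} {j k : Nat} (h : rpg.getD j 0 = rpg.getD k 0) :
    pvQb rpg Q j = pvQb rpg Q k := by
  unfold pvQb
  rw [h]

theorem pvInvA_step (rpg Q labels : List Int) (t : Nat)
    (ht : t < rpg.length)
    (st : PySem.Dict Int (Int × Int) × Option Int × Int)
    (hinv : pvInvA rpg Q labels t st) :
    pvInvA rpg Q labels (t + 1)
      (pvAstep (PySem.Set.ofList Q) rpg labels st ((t : Int), rpg.getD t 0)) := by
  by_cases hqb : pvQb rpg Q t
  case neg =>
    have hq : PySem.Set.contains (PySem.Set.ofList Q) (rpg.getD t 0) = false := by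
      simpa [pvQb] using hqb
    simp only [pvAstep, hq, Bool.false_eq_true, if_false]
    simpa only [pvInvA, pvPrev_succ, hqb, Bool.false_eq_true, if_false] using hinv
  case pos =>
    have hq : PySem.Set.contains (PySem.Set.ofList Q) (rpg.getD t 0) = true := by
      simpa [pvQb] using hqb
    have hprev1 : pvPrev rpg Q (t + 1) = some t := by rw [pvPrev_succ, if_pos hqb]
    have hnext_t : pvNext rpg Q rpg.length t = some t := pvNext_self ht hqb
    cases hp : pvPrev rpg Q t with
    | none =>
      have hst : st = (PySem.Dict.empty, none, 0) := by
        have := hinv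
        rw [pvInvA, hp] at this
        exact this
      subst hst
      simp only [pvAstep, hq, if_true]
      rw [pvInvA, hprev1]
      refine ⟨rfl, rfl, ?_, ?_⟩
      · intro x jx hocc
        obtain ⟨hjx1, hjx2⟩ := pvOcc_lt hocc
        by_cases hxt : rpg.getD t 0 = x
        · -- x is the query value being inserted; its last occurrence is t itself
          have hjxt : jx = t := by
            by_contra hne
            exact pvOcc_gap hocc t (by omega) (by omega) hxt
          subst hjxt
          rw [← hxt]
          rw [pv_fill_get?_ne rpg _ 0 ((jx : Nat) : Int) _ _
            (fun k hk1 hk2 hkey => by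
              have hkq : pvQb rpg Q k.toNat = true := by
                rw [pvQb_congr (k := jx) (by rw [← pv_key_int rpg hk1, hkey])]
                exact hqb
              have hkf := pvPrev_none_all hp k.toNat (by omega)
              simp [hkf] at hkq)]
          rw [PySem.Dict.get?_insert_self]
          simp [pvSpec, hprev1, hnext_t, pvLab]
        · -- x occurs only strictly before t: the backward fill wrote its last occurrence
          have hjxlt : jx < t := by
            rcases Nat.lt_succ_iff_lt_or_eq.1 hjx1 with h' | rfl
            · exact h'
            · exact absurd hjx2 hxt
          rw [show x = rpg.getD jx 0 from hjx2.symm, ← pv_key_nat rpg jx]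
          rw [pv_fill_get?_last rpg _ 0 ((t : Nat) : Int) _ (jx : Int) (by omega) (by omega)
            (fun k hk1 hk2 hkey => by
              have hkval : rpg.getD k.toNat 0 = x := by
                rw [← pv_key_int rpg hk1, hkey, pv_key_nat rpg jx, hjx2]
              by_contra hgt
              exact pvOcc_gap hocc k.toNat (by omega) (by omega) hkval)]
          have hprevj : pvPrev rpg Q (jx + 1) = none := pvPrev_none_mono hp (by omega)
          have hnextj : pvNext rpg Q rpg.length jx = some t :=
            pvNext_of_gap ht hqb (t - jx) jx (by omega)
              (fun k hk1 hk2 => pvPrev_none_all hp k hk2)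
          simp [pvSpec, hprevj, hnextj, pvLab]
      · intro x hocc
        rw [pv_fill_get?_ne rpg _ 0 ((t : Nat) : Int) _ x
          (fun k hk1 hk2 hkey =>
            pvOcc_none_all hocc k.toNat (by omega)
              (by rw [← pv_key_int rpg hk1]; exact hkey))]
        rw [PySem.Dict.get?_insert_of_ne _ _
          (fun hh => pvOcc_none_all hocc t (by omega) hh.symm)]
        exact PySem.Dict.get?_empty _
    | some p =>
      have hmain := hinv
      rw [pvInvA, hp] at hmain
      obtain ⟨h1, h2, h3, h4⟩ := hmain
      have hpt : p < t := (pvPrev_lt hp).1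
      have hgap : ∀ k, p < k → k < t → pvQb rpg Q k = false := pvPrev_gap hp
      simp only [pvAstep, hq, if_true, h1, h2,
        PySem.Int.floordiv_eq_ediv_of_pos (by norm_num : (0:Int) < 2)]
      rw [pvInvA, hprev1]
      refine ⟨rfl, rfl, ?_, ?_⟩
      · intro x jx hocc
        obtain ⟨hjx1, hjx2⟩ := pvOcc_lt hocc
        by_cases hxt : rpg.getD t 0 = x
        · -- x is the query value inserted at t; the two fills carry only non-query values
          have hjxt : jx = t := by
            by_contra hne
            exact pvOcc_gap hocc t (by omega) (by omega) hxt
          subst hjxt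
          rw [← hxt]
          rw [pv_fill_get?_ne rpg _ _ ((jx : Nat) : Int) _ _
            (fun k hk1 hk2 hkey => by
              have hkq : pvQb rpg Q k.toNat = true := by
                rw [pvQb_congr (k := jx) (by rw [← pv_key_int rpg (by omega), hkey])]
                exact hqb
              have hkf := hgap k.toNat (by omega) (by omega)
              simp [hkf] at hkq)]
          rw [pv_fill_get?_ne rpg _ ((p : Int) + 1) _ _ _
            (fun k hk1 hk2 hkey => by
              have hkq : pvQb rpg Q k.toNat = true := by
                rw [pvQb_congr (k := jx) (by rw [← pv_key_int rpg (by omega), hkey])]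
                exact hqb
              have hkf := hgap k.toNat (by omega) (by omega)
              simp [hkf] at hkq)]
          rw [PySem.Dict.get?_insert_self]
          simp [pvSpec, hprev1, hnext_t, pvLab]
        · have hjxlt : jx < t := by
            rcases Nat.lt_succ_iff_lt_or_eq.1 hjx1 with h' | rfl
            · exact h'
            · exact absurd hjx2 hxt
          rcases Nat.lt_or_ge p jx with hpjx | hpjx
          · -- p < jx < t: the segment fills wrote x's last occurrence
            have hprevj : pvPrev rpg Q (jx + 1) = some p :=
              pvPrev_stable hp (jx + 1) (by omega) (by omega)
            have hnextj : pvNext rpg Q rpg.length jx = some t :=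
              pvNext_of_gap ht hqb (t - jx) jx (by omega)
                (fun k hk1 hk2 => hgap k (by omega) hk2)
            rw [show x = rpg.getD jx 0 from hjx2.symm, ← pv_key_nat rpg jx]
            rcases lt_or_ge (jx : Int) ((p : Int) + ((t : Int) - (p : Int) - 1) / 2 + 1) with hjm | hjm
            · rw [pv_fill_get?_ne rpg _ _ ((t : Nat) : Int) _ _
                (fun k hk1 hk2 hkey => by
                  have hkval : rpg.getD k.toNat 0 = x := by
                    rw [← pv_key_int rpg (by omega), hkey, pv_key_nat rpg jx, hjx2]
                  exact absurd hkval (pvOcc_gap hocc k.toNat (by omega) (by omega)))]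
              rw [pv_fill_get?_last rpg _ ((p : Int) + 1) _ _ (jx : Int) (by omega) (by omega)
                (fun k hk1 hk2 hkey => by
                  have hkval : rpg.getD k.toNat 0 = x := by
                    rw [← pv_key_int rpg (by omega), hkey, pv_key_nat rpg jx, hjx2]
                  by_contra hgt
                  exact pvOcc_gap hocc k.toNat (by omega) (by omega) hkval)]
              have hcmp : (jx : Int) - (p : Int) < (t : Int) - (jx : Int) := by omega
              simp [pvSpec, hprevj, hnextj, hcmp, pvLab]
            · rw [pv_fill_get?_last rpg _ _ ((t : Nat) : Int) _ (jx : Int) (by omega) (by omega)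
                (fun k hk1 hk2 hkey => by
                  have hkval : rpg.getD k.toNat 0 = x := by
                    rw [← pv_key_int rpg (by omega), hkey, pv_key_nat rpg jx, hjx2]
                  by_contra hgt
                  exact pvOcc_gap hocc k.toNat (by omega) (by omega) hkval)]
              have hcmp : ¬ ((jx : Int) - (p : Int) < (t : Int) - (jx : Int)) := by omega
              simp [pvSpec, hprevj, hnextj, hcmp, pvLab]
          · -- jx ≤ p: nothing of this step touches x
            rw [pv_fill_get?_ne rpg _ _ ((t : Nat) : Int) _ _
              (fun k hk1 hk2 hkey => by
                have hkval : rpg.getD k.toNat 0 = x := by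
                  rw [← pv_key_int rpg (by omega)]
                  exact hkey
                exact absurd hkval (pvOcc_gap hocc k.toNat (by omega) (by omega)))]
            rw [pv_fill_get?_ne rpg _ ((p : Int) + 1) _ _ _
              (fun k hk1 hk2 hkey => by
                have hkval : rpg.getD k.toNat 0 = x := by
                  rw [← pv_key_int rpg (by omega)]
                  exact hkey
                exact absurd hkval (pvOcc_gap hocc k.toNat (by omega) (by omega)))]
            rw [PySem.Dict.get?_insert_of_ne _ _ (fun hh => hxt hh.symm)]
            exact h3 x jx (pvOcc_stable hocc (p + 1) (by omega) (by omega))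
      · intro x hocc
        rw [pv_fill_get?_ne rpg _ _ ((t : Nat) : Int) _ x
          (fun k hk1 hk2 hkey =>
            pvOcc_none_all hocc k.toNat (by omega)
              (by rw [← pv_key_int rpg (by omega)]; exact hkey))]
        rw [pv_fill_get?_ne rpg _ ((p : Int) + 1) _ _ x
          (fun k hk1 hk2 hkey =>
            pvOcc_none_all hocc k.toNat (by omega)
              (by rw [← pv_key_int rpg (by omega)]; exact hkey))]
        rw [PySem.Dict.get?_insert_of_ne _ _
          (fun hh => pvOcc_none_all hocc t (by omega) hh.symm)]
        exact h4 x (pvOcc_none_mono hocc (by omega))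

theorem pvInvA_all (rpg Q labels : List Int) :
    ∀ t, t ≤ rpg.length → pvInvA rpg Q labels t (pvStA rpg Q labels t) := by
  intro t
  induction t with
  | zero =>
    intro _
    rw [pvInvA]
    rfl
  | succ t ih =>
    intro h
    rw [pvStA_succ rpg Q labels t (by omega)]
    exact pvInvA_step rpg Q labels t (by omega) _ (ih (by omega))

theorem pvA_fold_eq (rpg Q labels : List Int) :
    (PySem.List.enumerate rpg 0).foldl (pvAstep (PySem.Set.ofList Q) rpg labels)
      (PySem.Dict.empty, none, 0) = pvStA rpg Q labels rpg.length := by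
  unfold pvStA
  rw [List.take_of_length_le (by rw [PySem.List.length_enumerate])]

-- the dict A holds when it builds its output (tail fill applied)
def pvAdict (rpg Q labels : List Int) : PySem.Dict Int (Int × Int) :=
  let st := pvStA rpg Q labels rpg.length
  if PySem.Set.contains (PySem.Set.ofList Q) (rpg.getD (rpg.length - 1) 0) then st.1
  else (PySem.List.pyRange (st.2.2 + 1) ((PySem.List.len rpg - 1) + 1) 1).foldl
    (fun d j => d.insert ((PySem.List.pyGet? rpg j).getD 0) ((st.2.1).getD 0, j - st.2.2)) st.1

theorem pvQb_of_mem {rpg Q : List Int} {j : Nat}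
    (h : rpg.getD j 0 ∈ Q) : pvQb rpg Q j = true := by
  have h' : rpg[j]?.getD 0 ∈ Q := by rwa [← List.getD_eq_getElem?_getD]
  simp [pvQb, h']

theorem pvPrev_top {rpg Q : List Int} (hex : ∃ x ∈ rpg, x ∈ Q) :
    ∃ pk, pvPrev rpg Q rpg.length = some pk := by
  obtain ⟨x, hx, hxQ⟩ := hex
  obtain ⟨j0, hj0, rfl⟩ := List.mem_iff_getElem.1 hx
  cases hpk : pvPrev rpg Q rpg.length with
  | some pk => exact ⟨pk, rfl⟩
  | none =>
    have := pvPrev_none_all hpk j0 hj0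
    rw [pvQb_of_mem (by rwa [List.getD_eq_getElem _ _ hj0])] at this
    cases this

theorem pvAdict_get (rpg Q labels : List Int) (hex : ∃ x ∈ rpg, x ∈ Q) :
    ∀ (x : Int) (jx : Nat), pvOcc rpg x rpg.length = some jx →
      (pvAdict rpg Q labels).get? x = some (pvSpec rpg Q labels rpg.length jx) := by
  intro x jx hocc
  obtain ⟨hjx1, hjx2⟩ := pvOcc_lt hocc
  have hn1 : 1 ≤ rpg.length := by omega
  obtain ⟨pk, hpk⟩ := pvPrev_top hex
  have hinv := pvInvA_all rpg Q labels rpg.length le_rfl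
  rw [pvInvA, hpk] at hinv
  obtain ⟨h1, h2, h3, h4⟩ := hinv
  by_cases hql : pvQb rpg Q (rpg.length - 1)
  · -- last node is a query: no tail fill, and pk = length - 1
    have hql' : PySem.Set.contains (PySem.Set.ofList Q) (rpg.getD (rpg.length - 1) 0) = true := by
      simpa [pvQb] using hql
    have hpk' : pk = rpg.length - 1 := by
      have hh : pvPrev rpg Q (rpg.length - 1 + 1) = some (rpg.length - 1) := by
        rw [pvPrev_succ, if_pos hql]
      rw [show rpg.length - 1 + 1 = rpg.length by omega, hpk] at hh
      exact Option.some.inj hh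
    simp only [pvAdict, hql', if_true]
    exact h3 x jx (by rwa [show pk + 1 = rpg.length by omega])
  · have hql' : PySem.Set.contains (PySem.Set.ofList Q) (rpg.getD (rpg.length - 1) 0) = false := by
      simpa [pvQb] using hql
    have hpkn : pvPrev rpg Q (rpg.length - 1) = some pk := by
      have hh : pvPrev rpg Q (rpg.length - 1 + 1) = pvPrev rpg Q (rpg.length - 1) := by
        rw [pvPrev_succ, if_neg hql]
      rw [show rpg.length - 1 + 1 = rpg.length by omega, hpk] at hh
      exact hh.symm
    have hpklt : pk < rpg.length - 1 := (pvPrev_lt hpkn).1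
    simp only [pvAdict, hql', Bool.false_eq_true, if_false, h1, h2,
      PySem.List.len_eq, Option.getD_some]
    rcases Nat.lt_or_ge pk jx with hpj | hpj
    · -- pk < jx < length: the tail fill wrote x's last occurrence
      rw [show x = rpg.getD jx 0 from hjx2.symm, ← pv_key_nat rpg jx]
      rw [pv_fill_get?_last rpg _ ((pk : Int) + 1) _ _ (jx : Int) (by omega) (by omega)
        (fun k hk1 hk2 hkey => by
          have hkval : rpg.getD k.toNat 0 = rpg.getD jx 0 := by
            rw [← pv_key_int rpg (by omega), hkey, pv_key_nat rpg jx]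
          by_contra hgt
          exact pvOcc_gap hocc k.toNat (by omega) (by omega) (hkval.trans hjx2))]
      have hprevj : pvPrev rpg Q (jx + 1) = some pk :=
        pvPrev_stable hpk (jx + 1) (by omega) (by omega)
      have hnextj : pvNext rpg Q rpg.length jx = none :=
        pvNext_none (fun k hk1 hk2 => pvPrev_gap hpk k (by omega) (by omega))
      simp [pvSpec, hprevj, hnextj, pvLab]
    · -- jx ≤ pk: the tail fill does not touch x
      rw [pv_fill_get?_ne rpg _ ((pk : Int) + 1) _ _ _
        (fun k hk1 hk2 hkey => by
          have hkval : rpg.getD k.toNat 0 = x := by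
            rw [← pv_key_int rpg (by omega)]
            exact hkey
          exact absurd hkval (pvOcc_gap hocc k.toNat (by omega) (by omega)))]
      exact h3 x jx (pvOcc_stable hocc (pk + 1) (by omega) (by omega))

-- B's per-position values: nearest query at-or-before, nearest query at-or-after
def pvF (rpg Q labels : List Int) (j : Nat) : Option (Int × Int) :=
  (pvPrev rpg Q (j + 1)).map (fun p => (pvLab rpg labels p, (j : Int) - (p : Int)))
def pvG (rpg Q labels : List Int) (n j : Nat) : Option (Int × Int) :=
  (pvNext rpg Q n j).map (fun q => (pvLab rpg labels q, (q : Int) - (j : Int)))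

theorem pvBfwd_eq (rpg Q labels : List Int) : ∀ t : Nat,
    (PySem.List.pyRange 0 (t : Int) 1).foldl (pvBfwdStep (PySem.Set.ofList Q) rpg labels) (none, [])
    = ((pvPrev rpg Q t).map (fun p => (pvLab rpg labels p, (p : Int))),
       (List.range t).map (pvF rpg Q labels)) := by
  intro t
  induction t with
  | zero => simp [PySem.List.pyRange_one_eq_nil (le_refl (0 : Int)), pvPrev]
  | succ t ih =>
    rw [show ((t + 1 : Nat) : Int) = (t : Int) + 1 by push_cast; ring,
      PySem.List.pyRange_one_succ_right (by positivity), List.foldl_append, ih]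
    simp only [List.foldl_cons, List.foldl_nil]
    by_cases hqt : pvQb rpg Q t
    · have hqm : rpg[t]?.getD 0 ∈ Q := by
        simpa [pvQb, List.getD_eq_getElem?_getD] using hqt
      simp [pvBfwdStep, hqm, pvPrev_succ, hqt, pvF, pvLab,
        List.range_succ, List.getD_eq_getElem?_getD]
    · have hqm : rpg[t]?.getD 0 ∉ Q := by
        simpa [pvQb, List.getD_eq_getElem?_getD] using hqt
      simp [pvBfwdStep, hqm, pvPrev_succ, hqt, pvF, pvLab,
        List.range_succ, List.getD_eq_getElem?_getD, Option.map_map]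
      cases pvPrev rpg Q t <;> rfl

theorem pvBbwd_eq (rpg Q labels : List Int) (n : Nat) : ∀ d t, t + d = n →
    ((PySem.List.pyRange (t : Int) (n : Int) 1).reverse.foldl
      (pvBbwdStep (PySem.Set.ofList Q) rpg labels) (none, []))
    = ((pvNext rpg Q n t).map (fun q => (pvLab rpg labels q, (q : Int))),
       ((List.range' t d).map (pvG rpg Q labels n)).reverse) := by
  intro d
  induction d with
  | zero =>
    intro t htd
    have : t = n := by omega
    subst this
    have hnn : pvNext rpg Q t t = none :=
      pvNext_none (fun j h1 h2 => absurd (lt_of_le_of_lt h1 h2) (lt_irrefl t))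
    simp [PySem.List.pyRange_one_eq_nil (le_refl ((t : Nat) : Int)), hnn]
  | succ d ih =>
    intro t htd
    have htn : t < n := by omega
    rw [PySem.List.pyRange_one_cons (by exact_mod_cast htn),
      show ((t : Int) + 1) = ((t + 1 : Nat) : Int) by push_cast; ring,
      List.reverse_cons, List.foldl_append, ih (t + 1) (by omega)]
    simp only [List.foldl_cons, List.foldl_nil]
    by_cases hqt : pvQb rpg Q t
    · have hqm : rpg[t]?.getD 0 ∈ Q := by
        simpa [pvQb, List.getD_eq_getElem?_getD] using hqt
      simp [pvBbwdStep, hqm, pvNext_self htn hqt, pvG, pvLab,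
        List.range'_succ, List.reverse_cons, List.getD_eq_getElem?_getD]
    · have hqm : rpg[t]?.getD 0 ∉ Q := by
        simpa [pvQb, List.getD_eq_getElem?_getD] using hqt
      simp [pvBbwdStep, hqm, pvNext_succ htn (by simpa using hqt), pvG, pvLab,
        List.range'_succ, List.reverse_cons, List.getD_eq_getElem?_getD, Option.map_map]
      cases pvNext rpg Q n t <;> rfl

-- B's value dict, with the two sweeps replaced by their characterisation
def pvVal (rpg Q labels : List Int) : PySem.Dict Int (Int × Int) :=
  (PySem.List.pyRange 0 (rpg.length : Int) 1).foldl
    (pvBvalStep rpg ((List.range rpg.length).map (pvF rpg Q labels))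
      ((List.range rpg.length).map (pvG rpg Q labels rpg.length))) PySem.Dict.empty

theorem pvBvalStep_eq (rpg Q labels : List Int) (i : Int) (h0 : 0 ≤ i)
    (h1 : i < (rpg.length : Int)) (d : PySem.Dict Int (Int × Int)) :
    pvBvalStep rpg ((List.range rpg.length).map (pvF rpg Q labels))
      ((List.range rpg.length).map (pvG rpg Q labels rpg.length)) d i
    = d.insert ((PySem.List.pyGet? rpg i).getD 0)
        (pvSpec rpg Q labels rpg.length i.toNat) := by
  have hti : i.toNat < rpg.length := by omega
  have hfwd : (PySem.List.pyGet? ((List.range rpg.length).map (pvF rpg Q labels)) i).getD none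
      = pvF rpg Q labels i.toNat := by
    rw [PySem.List.pyGet?_of_nonneg _ h0]
    simp [List.getElem?_map, List.getElem?_range hti]
  have hbwd : (PySem.List.pyGet? ((List.range rpg.length).map (pvG rpg Q labels rpg.length)) i).getD none
      = pvG rpg Q labels rpg.length i.toNat := by
    rw [PySem.List.pyGet?_of_nonneg _ h0]
    simp [List.getElem?_map, List.getElem?_range hti]
  simp only [pvBvalStep, hfwd, hbwd]
  cases hP : pvPrev rpg Q (i.toNat + 1) <;> cases hN : pvNext rpg Q rpg.length i.toNat <;>
    simp [pvSpec, pvF, pvG, hP, hN]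

theorem pvVal_get (rpg Q labels : List Int) :
    ∀ (x : Int) (jx : Nat), pvOcc rpg x rpg.length = some jx →
      (pvVal rpg Q labels).get? x = some (pvSpec rpg Q labels rpg.length jx) := by
  intro x jx hocc
  obtain ⟨hjx1, hjx2⟩ := pvOcc_lt hocc
  unfold pvVal
  rw [PySem.List.foldl_congr_mem _ _
    (fun d i => d.insert ((PySem.List.pyGet? rpg i).getD 0)
      (pvSpec rpg Q labels rpg.length i.toNat)) _
    (fun acc i hi => by
      obtain ⟨hi0, hi1⟩ := PySem.List.mem_pyRange_one.1 hi
      exact pvBvalStep_eq rpg Q labels i hi0 hi1 acc)]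
  rw [show x = rpg.getD jx 0 from hjx2.symm, ← pv_key_nat rpg jx]
  rw [pv_fill_get?_last rpg _ 0 (rpg.length : Int) _ (jx : Int) (by omega) (by omega)
    (fun k hk1 hk2 hkey => by
      have hkval : rpg.getD k.toNat 0 = rpg.getD jx 0 := by
        rw [← pv_key_int rpg hk1, hkey, pv_key_nat rpg jx]
      by_contra hgt
      exact pvOcc_gap hocc k.toNat (by omega) (by omega) (hkval.trans hjx2))]
  simp

theorem pvBbwd_top (rpg Q labels : List Int) (n : Nat) :
    ((PySem.List.pyRange 0 (n : Int) 1).reverse.foldl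
      (pvBbwdStep (PySem.Set.ofList Q) rpg labels) (none, []))
    = ((pvNext rpg Q n 0).map (fun q => (pvLab rpg labels q, (q : Int))),
       ((List.range n).map (pvG rpg Q labels n)).reverse) := by
  have h := pvBbwd_eq rpg Q labels n n 0 (by omega)
  simpa [List.range_eq_range'] using h

-- A's output, written through pvAdict
theorem predict_fast_eq (rpg Q labels : List Int) (max_dist : Option Int) (hne : rpg ≠ []) :
    predict_fast rpg Q labels max_dist =
    match max_dist with
    | none => (PySem.List.pyRange 0 (PySem.List.len labels) 1).map
        (fun k => some (((pvAdict rpg Q labels).get? k).getD (0, 0)).1)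
    | some md => (PySem.List.pyRange 0 (PySem.List.len labels) 1).map
        (fun k => if (((pvAdict rpg Q labels).get? k).getD (0, 0)).2 ≤ md
                  then some (((pvAdict rpg Q labels).get? k).getD (0, 0)).1 else none) := by
  have hlen : 0 < rpg.length := List.length_pos_iff.2 hne
  cases max_dist <;>
    simp only [predict_fast, pvA_fold_eq, pvAdict, List.getLast?_eq_getElem?,
      List.getElem?_eq_getElem (show rpg.length - 1 < rpg.length by omega),
      List.getD_eq_getElem?_getD, Option.getD_some]

-- B's output, written through pvVal
theorem predict_fast_alt_eq (rpg Q labels : List Int) (max_dist : Option Int) :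
    predict_fast_alt rpg Q labels max_dist =
    match max_dist with
    | none => (PySem.List.pyRange 0 (PySem.List.len labels) 1).map
        (fun k => some (((pvVal rpg Q labels).get? k).getD (0, 0)).1)
    | some md => (PySem.List.pyRange 0 (PySem.List.len labels) 1).map
        (fun k => if (((pvVal rpg Q labels).get? k).getD (0, 0)).2 ≤ md
                  then some (((pvVal rpg Q labels).get? k).getD (0, 0)).1 else none) := by
  cases max_dist <;>
    simp only [predict_fast_alt, pvVal, PySem.List.len_eq,
      pvBfwd_eq rpg Q labels rpg.length, pvBbwd_top rpg Q labels rpg.length,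
      List.reverse_reverse]

-- ===== VERDICT (by name: the statement is the Claim_ definition above) =====
theorem predict_fast_spec : Claim_equal_predict_fast := by
  intro rpg Q labels max_dist hdom hpre
  obtain ⟨hex0, hcov, _⟩ := hpre
  have hne : rpg ≠ [] := by
    rcases hex0 with ⟨x, hx, _⟩ | ⟨_, h⟩
    · exact List.ne_nil_of_mem hx
    · exact h
  unfold Spec_predict_fast
  rcases hex0 with hex | ⟨hlab, _⟩
  case inr =>
    -- labels is empty: both outputs are the empty comprehension
    rw [predict_fast_eq rpg Q labels max_dist hne, predict_fast_alt_eq rpg Q labels max_dist]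
    cases max_dist <;>
      simp [hlab, PySem.List.pyRange_one_eq_nil (le_refl (0 : Int))]
  rw [predict_fast_eq rpg Q labels max_dist hne, predict_fast_alt_eq rpg Q labels max_dist]
  have hkey : ∀ k ∈ PySem.List.pyRange 0 (PySem.List.len labels) 1,
      (pvAdict rpg Q labels).get? k = (pvVal rpg Q labels).get? k := by
    intro k hk
    obtain ⟨hk0, hk1⟩ := PySem.List.mem_pyRange_one.1 hk
    rw [PySem.List.len_eq] at hk1
    have hmem : k ∈ rpg := by
      have := hcov k.toNat (List.mem_range.2 (by omega))
      rwa [show ((k.toNat : Nat) : Int) = k by omega] at this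
    obtain ⟨jx, hjx⟩ := pvOcc_of_mem hmem
    rw [pvAdict_get rpg Q labels hex k jx hjx, pvVal_get rpg Q labels k jx hjx]
  cases max_dist with
  | none => exact List.map_congr_left (fun k hk => by rw [hkey k hk])
  | some md => exact List.map_congr_left (fun k hk => by rw [hkey k hk])
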